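-- pv_equiv track=rewrite | github.com/jerrt2003/leetcode-in-python | 高頻面經/Google/Google Phone Interview/Matching Characters.py | matchingChar
-- ===== SOURCE A (Python) =====
-- import collections
--
-- def matchingChar(str1, str2):
--     def findPattern(str):
--         _firstHit = collections.defaultdict(int)
--         pattern = []
--         for i in range(len(str)):
--             if str[i] not in _firstHit:
--                 _firstHit[str[i]] = i
--             pattern.append(_firstHit[str[i]])
--         return pattern
--
--     return findPattern(str1) == findPattern(str2)
-- ===== SOURCE B (Python) =====
-- def matchingChar(str1, str2):
--     if len(str1) != len(str2):
--         return False
--     fwd, bwd = {}, {}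
--     for c1, c2 in zip(str1, str2):
--         if c1 in fwd:
--             if fwd[c1] != c2:
--                 return False
--         elif c2 in bwd:
--             return False
--         else:
--             fwd[c1] = c2
--             bwd[c2] = c1
--     return True
-- ===== Notes on version B (the rewrite author's own statement) =====
-- stated objective: faster
-- what changed: Replaces building two first-occurrence-index pattern lists (via defaultdict + append) and comparing them with the canonical single-pass isomorphic-strings check over zip(str1, str2) maintaining forward and backward character maps with early exit.
import Mathlib
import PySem

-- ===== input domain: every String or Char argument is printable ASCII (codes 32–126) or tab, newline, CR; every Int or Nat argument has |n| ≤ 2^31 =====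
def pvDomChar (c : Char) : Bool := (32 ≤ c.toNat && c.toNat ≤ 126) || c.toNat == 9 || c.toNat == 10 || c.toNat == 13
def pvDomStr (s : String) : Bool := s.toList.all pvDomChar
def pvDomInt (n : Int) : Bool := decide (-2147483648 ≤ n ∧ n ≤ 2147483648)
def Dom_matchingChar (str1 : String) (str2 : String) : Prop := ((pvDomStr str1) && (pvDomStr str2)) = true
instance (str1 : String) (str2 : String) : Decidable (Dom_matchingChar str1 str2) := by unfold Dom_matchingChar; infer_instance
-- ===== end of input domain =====

-- B replaces A's two first-occurrence-index pattern lists with a single simultaneous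
-- pass over the zipped strings maintaining a forward and a backward character map.

-- ===== PORT A =====
-- findPattern: for i in range(len(str)): if str[i] not in _firstHit: _firstHit[str[i]] = i; pattern.append(_firstHit[str[i]])
def findPatternA (cs : List Char) : List Int :=
  ((PySem.List.enumerate cs 0).foldl
    (fun (st : PySem.Dict Char Int × List Int) ic =>
      let fh := if st.1.contains ic.2 then st.1 else st.1.insert ic.2 ic.1
      (fh, st.2 ++ [fh.getD ic.2 0]))
    (PySem.Dict.empty, [])).2

def matchingChar (str1 : String) (str2 : String) : Bool :=
  findPatternA str1.toList == findPatternA str2.toList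

-- ===== PORT B =====
-- the loop body of Source B: for c1, c2 in zip(str1, str2): ...
def isoGo : List (Char × Char) → PySem.Dict Char Char → PySem.Dict Char Char → Bool
  | [], _, _ => true
  | (c1, c2) :: rest, fwd, bwd =>
    match fwd.get? c1 with
    | some d => if d == c2 then isoGo rest fwd bwd else false
    | none =>
      if (bwd.get? c2).isSome then false
      else isoGo rest (fwd.insert c1 c2) (bwd.insert c2 c1)

def matchingChar_alt (str1 : String) (str2 : String) : Bool :=
  if str1.toList.length != str2.toList.length then false
  else isoGo (str1.toList.zip str2.toList) PySem.Dict.empty PySem.Dict.empty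

-- ===== PRECONDITION & SPEC =====
def Spec_matchingChar (str1 : String) (str2 : String) (out : Bool) : Prop := out = matchingChar_alt str1 str2
instance (str1 : String) (str2 : String) (out : Bool) : Decidable (Spec_matchingChar str1 str2 out) := by unfold Spec_matchingChar; infer_instance

-- ===== CLAIM (what is proved, stated in full; the proofs are below) =====
def Claim_equal_matchingChar : Prop := ∀ (str1 : String) (str2 : String), Dom_matchingChar str1 str2 → Spec_matchingChar str1 str2 (matchingChar str1 str2)

-- ===== LEMMAS AND PROOFS =====

-- "same first-occurrence pattern" as a relation on positions
def Riff (l1 l2 : List Char) : Prop :=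
  ∀ i j, i < l1.length → j < l1.length →
    (l1.getD i ' ' = l1.getD j ' ' ↔ l2.getD i ' ' = l2.getD j ' ')

-- getD facts over append
theorem getD_append_lt {α : Type} [Inhabited α] (p l : List α) (i : Nat) (d : α) (h : i < p.length) :
    (p ++ l).getD i d = p.getD i d := by
  simp [List.getD, List.getElem?_append_left h]

theorem getD_append_len {α : Type} [Inhabited α] (p : List α) (c : α) (l : List α) (d : α) :
    (p ++ c :: l).getD p.length d = c := by
  simp [List.getD]

theorem getD_mem' {l : List Char} {i : Nat} (h : i < l.length) : l.getD i ' ' ∈ l := by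
  simp only [List.getD, List.getElem?_eq_getElem h, Option.getD_some]
  exact List.getElem_mem h

-- idxOf minimality helpers
theorem getD_lt_idxOf_ne {l : List Char} {c : Char} {k : Nat} (h : k < l.idxOf c) :
    l.getD k ' ' ≠ c := by
  induction l generalizing k with
  | nil => simp [List.idxOf] at h
  | cons a t ih =>
    by_cases hac : a = c
    · simp [List.idxOf_cons_eq _ hac] at h
    · rw [List.idxOf_cons_ne _ hac] at h
      cases k with
      | zero => simpa using hac
      | succ k => simpa using ih (Nat.lt_of_succ_lt_succ h)

theorem idxOf_eq_of_min {l : List Char} {c : Char} {j : Nat} (hj : j < l.length)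
    (hc : l.getD j ' ' = c) (hmin : ∀ k, k < j → l.getD k ' ' ≠ c) : l.idxOf c = j := by
  induction l generalizing j with
  | nil => simp at hj
  | cons a t ih =>
    cases j with
    | zero =>
      simp at hc
      simp [List.idxOf_cons_eq _ hc]
    | succ j =>
      have ha : a ≠ c := by simpa using hmin 0 (Nat.succ_pos j)
      rw [List.idxOf_cons_ne _ ha]
      have := ih (Nat.lt_of_succ_lt_succ hj) (by simpa using hc)
        (fun k hk => by simpa using hmin (k + 1) (Nat.succ_lt_succ hk))
      omega

theorem getD_idxOf {l : List Char} {c : Char} (h : c ∈ l) : l.getD (l.idxOf c) ' ' = c := by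
  have hlt := List.idxOf_lt_length_of_mem h
  simp [List.getD, List.getElem?_eq_getElem hlt, List.getElem_idxOf hlt]

-- characterisation of A's pattern: entry k is the index of the first occurrence of l[k]
def patRef : List Char → List Char → List Int
  | _, [] => []
  | pre, c :: cs =>
    (if c ∈ pre then (pre.idxOf c : Int) else (pre.length : Int)) :: patRef (pre ++ [c]) cs

theorem findPatternA_fold (cs : List Char) :
    ∀ (pre : List Char) (d : PySem.Dict Char Int) (acc : List Int),
    (∀ c, d.get? c = if c ∈ pre then some (pre.idxOf c : Int) else none) →
    ((PySem.List.enumerate cs (pre.length : Int)).foldl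
      (fun (st : PySem.Dict Char Int × List Int) ic =>
        let fh := if st.1.contains ic.2 then st.1 else st.1.insert ic.2 ic.1
        (fh, st.2 ++ [fh.getD ic.2 0]))
      (d, acc)).2 = acc ++ patRef pre cs := by
  induction cs with
  | nil => intro pre d acc hd; simp [patRef, PySem.List.enumerate_nil]
  | cons c cs ih =>
    intro pre d acc hd
    rw [PySem.List.enumerate_cons, List.foldl_cons]
    have hcontains : d.contains c = (decide (c ∈ pre)) := by
      rw [PySem.Dict.contains_eq_isSome_get?, hd c]
      by_cases hc : c ∈ pre <;> simp [hc]
    by_cases hc : c ∈ pre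
    · have hget : d.getD c 0 = (pre.idxOf c : Int) := by
        rw [PySem.Dict.getD_eq_get?_getD, hd c]; simp [hc]
      have hstep := ih (pre ++ [c]) d (acc ++ [(pre.idxOf c : Int)])
        (by
          intro c'
          rw [hd c']
          by_cases hc' : c' ∈ pre
          · simp [hc', List.mem_append, List.idxOf_append_of_mem hc']
          · by_cases hcc : c' = c
            · subst hcc; exact absurd hc hc'
            · simp [hc', hcc, List.mem_append])
      simp only [hcontains, hc, decide_true, if_true, hget]
      have hlen2 : (pre.length : Int) + 1 = ((pre ++ [c]).length : Int) := by simp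
      rw [hlen2, hstep]
      simp [patRef, hc]
    · -- new character: insert
      have hnotc : d.contains c = false := by rw [hcontains]; simp [hc]
      have hget : (d.insert c (pre.length : Int)).getD c 0 = (pre.length : Int) := by
        simp [PySem.Dict.getD_insert_self]
      have hstep := ih (pre ++ [c]) (d.insert c (pre.length : Int)) (acc ++ [(pre.length : Int)])
        (by
          intro c'
          by_cases hcc : c' = c
          · subst hcc
            rw [PySem.Dict.get?_insert_self]
            simp [List.idxOf_append_of_notMem hc, List.idxOf_cons_self, hc]
          · rw [PySem.Dict.get?_insert_of_ne _ _ hcc, hd c']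
            by_cases hc' : c' ∈ pre
            · simp [hc', List.mem_append, List.idxOf_append_of_mem hc']
            · simp [hc', hcc, List.mem_append])
      simp only [hnotc, Bool.false_eq_true, if_false, hget]
      have hlen2 : (pre.length : Int) + 1 = ((pre ++ [c]).length : Int) := by simp
      rw [hlen2, hstep]
      simp [patRef, hc]

theorem findPatternA_eq (cs : List Char) : findPatternA cs = patRef [] cs := by
  have := findPatternA_fold cs [] PySem.Dict.empty []
    (by intro c; simp [PySem.Dict.get?_empty])
  simpa [findPatternA] using this

theorem patRef_length (cs : List Char) : ∀ pre, (patRef pre cs).length = cs.length := by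
  induction cs with
  | nil => intro pre; simp [patRef]
  | cons c cs ih => intro pre; simp [patRef, ih]

-- entry k of patRef pre cs is idxOf (cs[k]) in (pre ++ cs)
theorem patRef_getD (cs : List Char) :
    ∀ pre k, k < cs.length →
    (patRef pre cs).getD k 0 = (((pre ++ cs).idxOf (cs.getD k ' ') : Nat) : Int) := by
  induction cs with
  | nil => intro pre k hk; simp at hk
  | cons c cs ih =>
    intro pre k hk
    cases k with
    | zero =>
      simp only [patRef, List.getD_cons_zero]
      by_cases hc : c ∈ pre
      · rw [List.idxOf_append_of_mem hc]; simp [hc]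
      · rw [List.idxOf_append_of_notMem hc, List.idxOf_cons_self]
        simp [hc]
    | succ k =>
      have hk' : k < cs.length := Nat.lt_of_succ_lt_succ hk
      have := ih (pre ++ [c]) k hk'
      simp only [patRef, List.getD_cons_succ]
      rw [this]
      simp [List.append_assoc]

-- A's pattern comparison, expressed through Riff ------------------------------

theorem patRef_eq_iff_riff (l1 l2 : List Char) (hlen : l1.length = l2.length) :
    (patRef [] l1 = patRef [] l2 ↔ Riff l1 l2) := by
  constructor
  · intro hpat i j hi hj
    have hj2 : j < l2.length := hlen ▸ hj
    have hi2 : i < l2.length := hlen ▸ hi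
    have e1 : (patRef [] l1).getD i 0 = (patRef [] l2).getD i 0 := by rw [hpat]
    have e2 : (patRef [] l1).getD j 0 = (patRef [] l2).getD j 0 := by rw [hpat]
    rw [patRef_getD l1 [] i hi, patRef_getD l2 [] i hi2] at e1
    rw [patRef_getD l1 [] j hj, patRef_getD l2 [] j hj2] at e2
    simp only [List.nil_append, Int.natCast_inj] at e1 e2
    constructor
    · intro h
      have : l1.idxOf (l1.getD i ' ') = l1.idxOf (l1.getD j ' ') := by rw [h]
      have hidx : l2.idxOf (l2.getD i ' ') = l2.idxOf (l2.getD j ' ') := by omega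
      have m1 : l2.getD i ' ' ∈ l2 := getD_mem' hi2
      have m2 : l2.getD j ' ' ∈ l2 := getD_mem' hj2
      calc l2.getD i ' ' = l2.getD (l2.idxOf (l2.getD i ' ')) ' ' := (getD_idxOf m1).symm
        _ = l2.getD (l2.idxOf (l2.getD j ' ')) ' ' := by rw [hidx]
        _ = l2.getD j ' ' := getD_idxOf m2
    · intro h
      have : l2.idxOf (l2.getD i ' ') = l2.idxOf (l2.getD j ' ') := by rw [h]
      have hidx : l1.idxOf (l1.getD i ' ') = l1.idxOf (l1.getD j ' ') := by omega
      have m1 : l1.getD i ' ' ∈ l1 := getD_mem' hi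
      have m2 : l1.getD j ' ' ∈ l1 := getD_mem' hj
      calc l1.getD i ' ' = l1.getD (l1.idxOf (l1.getD i ' ')) ' ' := (getD_idxOf m1).symm
        _ = l1.getD (l1.idxOf (l1.getD j ' ')) ' ' := by rw [hidx]
        _ = l1.getD j ' ' := getD_idxOf m2
  · intro hr
    apply List.ext_getElem
    · rw [patRef_length, patRef_length, hlen]
    · intro k h1 h2
      have hk1 : k < l1.length := by rwa [patRef_length] at h1
      have hk2 : k < l2.length := hlen ▸ hk1
      have g1 : (patRef [] l1)[k] = (patRef [] l1).getD k 0 := by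
        simp [List.getD, List.getElem?_eq_getElem h1]
      have g2 : (patRef [] l2)[k] = (patRef [] l2).getD k 0 := by
        simp [List.getD, List.getElem?_eq_getElem h2]
      rw [g1, g2, patRef_getD l1 [] k hk1, patRef_getD l2 [] k hk2]
      simp only [List.nil_append, Int.natCast_inj]
      -- idxOf transfers along Riff
      set c1 := l1.getD k ' '
      set c2 := l2.getD k ' '
      have hm1 : c1 ∈ l1 := getD_mem' hk1
      have hidx1 := List.idxOf_lt_length_of_mem hm1
      have hle : l1.idxOf c1 ≤ k := by
        by_contra hgt
        exact getD_lt_idxOf_ne (Nat.lt_of_not_le (fun h => hgt h)) rfl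
      apply Eq.symm
      apply idxOf_eq_of_min (by omega)
      · have := (hr (l1.idxOf c1) k (by omega) hk1).mp (getD_idxOf hm1)
        exact this
      · intro m hm
        have hmk : m < k := by omega
        intro hcontra
        have := (hr m k (by omega) hk1).mpr (by exact hcontra)
        exact getD_lt_idxOf_ne (by omega) this

-- B's loop, expressed through Riff --------------------------------------------

theorem mapInv_ext (p1 p2 : List Char) (c1 c2 : Char) (f : PySem.Dict Char Char)
    (hplen : p1.length = p2.length)
    (hf : ∀ c d, f.get? c = some d ↔ ∃ i, i < p1.length ∧ p1.getD i ' ' = c ∧ p2.getD i ' ' = d)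
    (hnew : f.get? c1 = some c2) :
    ∀ c d, f.get? c = some d ↔
      ∃ i, i < (p1 ++ [c1]).length ∧ (p1 ++ [c1]).getD i ' ' = c ∧ (p2 ++ [c2]).getD i ' ' = d := by
  intro c d
  rw [hf c d]
  constructor
  · rintro ⟨k, hk, h1, h2⟩
    refine ⟨k, by simp only [List.length_append, List.length_cons, List.length_nil]; omega, ?_, ?_⟩
    · rw [getD_append_lt _ _ _ _ hk]; exact h1
    · rw [getD_append_lt _ _ _ _ (hplen ▸ hk)]; exact h2
  · rintro ⟨k, hk, h1, h2⟩
    simp only [List.length_append, List.length_cons, List.length_nil] at hk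
    by_cases hkp : k < p1.length
    · exact ⟨k, hkp, by rwa [getD_append_lt _ _ _ _ hkp] at h1,
        by rwa [getD_append_lt _ _ _ _ (hplen ▸ hkp)] at h2⟩
    · have hkeq : k = p1.length := by omega
      subst hkeq
      rw [show p1 ++ [c1] = p1 ++ c1 :: [] from rfl, getD_append_len] at h1
      rw [hplen, show p2 ++ [c2] = p2 ++ c2 :: [] from rfl, getD_append_len] at h2
      subst h1; subst h2
      exact (hf c1 c2).mp hnew

theorem mapInv_insert (p1 p2 : List Char) (c1 c2 : Char) (f : PySem.Dict Char Char)
    (hplen : p1.length = p2.length)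
    (hf : ∀ c d, f.get? c = some d ↔ ∃ i, i < p1.length ∧ p1.getD i ' ' = c ∧ p2.getD i ' ' = d)
    (hfc : f.get? c1 = none) :
    ∀ c d, (f.insert c1 c2).get? c = some d ↔
      ∃ i, i < (p1 ++ [c1]).length ∧ (p1 ++ [c1]).getD i ' ' = c ∧ (p2 ++ [c2]).getD i ' ' = d := by
  intro c d
  constructor
  · intro hg
    by_cases hcc : c = c1
    · subst hcc
      rw [PySem.Dict.get?_insert_self] at hg
      refine ⟨p1.length, by simp only [List.length_append, List.length_cons, List.length_nil]; omega, ?_, ?_⟩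
      · rw [show p1 ++ [c] = p1 ++ c :: [] from rfl, getD_append_len]
      · rw [hplen, show p2 ++ [c2] = p2 ++ c2 :: [] from rfl, getD_append_len]
        exact (Option.some_inj.mp hg)
    · rw [PySem.Dict.get?_insert_of_ne _ _ hcc] at hg
      obtain ⟨k, hk, h1, h2⟩ := (hf c d).mp hg
      exact ⟨k, by simp only [List.length_append, List.length_cons, List.length_nil]; omega,
        by rw [getD_append_lt _ _ _ _ hk]; exact h1,
        by rw [getD_append_lt _ _ _ _ (hplen ▸ hk)]; exact h2⟩
  · rintro ⟨k, hk, h1, h2⟩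
    simp only [List.length_append, List.length_cons, List.length_nil] at hk
    by_cases hkp : k < p1.length
    · rw [getD_append_lt _ _ _ _ hkp] at h1
      rw [getD_append_lt _ _ _ _ (hplen ▸ hkp)] at h2
      have hcc : c ≠ c1 := by
        intro hcc; subst hcc
        have := (hf c d).mpr ⟨k, hkp, h1, h2⟩
        rw [hfc] at this; simp at this
      rw [PySem.Dict.get?_insert_of_ne _ _ hcc]
      exact (hf c d).mpr ⟨k, hkp, h1, h2⟩
    · have hkeq : k = p1.length := by omega
      subst hkeq
      rw [show p1 ++ [c1] = p1 ++ c1 :: [] from rfl, getD_append_len] at h1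
      rw [hplen, show p2 ++ [c2] = p2 ++ c2 :: [] from rfl, getD_append_len] at h2
      subst h1; subst h2
      rw [PySem.Dict.get?_insert_self]

theorem isoGo_iff (l1 : List Char) :
    ∀ (l2 p1 p2 : List Char) (f b : PySem.Dict Char Char),
    l1.length = l2.length → p1.length = p2.length →
    (∀ c d, f.get? c = some d ↔
      ∃ i, i < p1.length ∧ p1.getD i ' ' = c ∧ p2.getD i ' ' = d) →
    (∀ c d, b.get? d = some c ↔
      ∃ i, i < p1.length ∧ p1.getD i ' ' = c ∧ p2.getD i ' ' = d) →
    (isoGo (l1.zip l2) f b = true ↔ Riff (p1 ++ l1) (p2 ++ l2)) := by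
  induction l1 with
  | nil =>
    intro l2 p1 p2 f b hlen hplen hf hb
    have : l2 = [] := by cases l2 <;> simp_all
    subst this
    simp only [List.zip_nil_left, isoGo, List.append_nil, true_iff]
    intro i j hi hj
    constructor
    · intro h
      have h1 := (hf (p1.getD i ' ') (p2.getD i ' ')).mpr ⟨i, hi, rfl, rfl⟩
      have h2 := (hf (p1.getD j ' ') (p2.getD j ' ')).mpr ⟨j, hj, rfl, rfl⟩
      rw [h] at h1
      rw [h1] at h2
      exact Option.some_inj.mp h2
    · intro h
      have h1 := (hb (p1.getD i ' ') (p2.getD i ' ')).mpr ⟨i, hi, rfl, rfl⟩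
      have h2 := (hb (p1.getD j ' ') (p2.getD j ' ')).mpr ⟨j, hj, rfl, rfl⟩
      rw [h] at h1
      rw [h1] at h2
      exact Option.some_inj.mp h2
  | cons c1 t1 ih =>
    intro l2 p1 p2 f b hlen hplen hf hb
    cases l2 with
    | nil => simp at hlen
    | cons c2 t2 =>
      have hlen2 : t1.length = t2.length := by simpa using hlen
      rw [List.zip_cons_cons, isoGo]
      cases hfc : f.get? c1 with
      | some d =>
        obtain ⟨i, hi, hpi1, hpi2⟩ := (hf c1 d).mp hfc
        simp only []
        by_cases hd : d = c2
        · have hd' : (d == c2) = true := by simp [hd]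
          rw [hd', if_pos rfl]
          have hpi2' : p2.getD i ' ' = c2 := hd ▸ hpi2
          have hb' : b.get? c2 = some c1 := (hb c1 c2).mpr ⟨i, hi, hpi1, hpi2'⟩
          have hfc' : f.get? c1 = some c2 := hd ▸ hfc
          have hbstd : ∀ c d, b.get? c = some d ↔
              ∃ i, i < p2.length ∧ p2.getD i ' ' = c ∧ p1.getD i ' ' = d := by
            intro c d
            rw [hb d c]
            constructor
            · rintro ⟨k, hk, h1, h2⟩; exact ⟨k, hplen ▸ hk, h2, h1⟩
            · rintro ⟨k, hk, h1, h2⟩; exact ⟨k, hplen ▸ hk, h2, h1⟩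
          have hfext := mapInv_ext p1 p2 c1 c2 f hplen hf hfc'
          have hbext := mapInv_ext p2 p1 c2 c1 b hplen.symm hbstd hb'
          have hres := ih t2 (p1 ++ [c1]) (p2 ++ [c2]) f b hlen2
            (by simp [hplen]) hfext
            (by
              intro c d
              rw [hbext d c]
              constructor
              · rintro ⟨k, hk, h1, h2⟩
                refine ⟨k, ?_, h2, h1⟩
                simp only [List.length_append, List.length_cons, List.length_nil] at hk ⊢
                omega
              · rintro ⟨k, hk, h1, h2⟩
                refine ⟨k, ?_, h2, h1⟩
                simp only [List.length_append, List.length_cons, List.length_nil] at hk ⊢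
                omega)
          rw [hres]
          simp [List.append_assoc]
        · have hd' : (d == c2) = false := by simp [hd]
          rw [hd']
          simp only [Bool.false_eq_true, if_false, false_iff]
          intro hr
          have hiL : i < (p1 ++ c1 :: t1).length := by
            simp only [List.length_append, List.length_cons]; omega
          have hkL : p1.length < (p1 ++ c1 :: t1).length := by
            simp only [List.length_append, List.length_cons]; omega
          have e1 : (p1 ++ c1 :: t1).getD i ' ' = c1 := by
            rw [getD_append_lt _ _ _ _ hi, hpi1]
          have e2 : (p1 ++ c1 :: t1).getD p1.length ' ' = c1 := getD_append_len _ _ _ _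
          have := (hr i p1.length hiL hkL).mp (by rw [e1, e2])
          rw [getD_append_lt _ _ _ _ (hplen ▸ hi), hpi2, hplen, getD_append_len] at this
          exact hd this
      | none =>
        simp only []
        cases hbc : b.get? c2 with
        | some c' =>
          simp only [Option.isSome_some, if_true, Bool.false_eq_true, false_iff]
          intro hr
          obtain ⟨i, hi, hpi1, hpi2⟩ := (hb c' c2).mp hbc
          have hiL : i < (p1 ++ c1 :: t1).length := by
            simp only [List.length_append, List.length_cons]; omega
          have hkL : p1.length < (p1 ++ c1 :: t1).length := by
            simp only [List.length_append, List.length_cons]; omega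
          have e2 : (p2 ++ c2 :: t2).getD i ' ' = c2 := by
            rw [getD_append_lt _ _ _ _ (hplen ▸ hi), hpi2]
          have e2' : (p2 ++ c2 :: t2).getD p1.length ' ' = c2 := by
            rw [hplen, getD_append_len]
          have h1 := (hr i p1.length hiL hkL).mpr (by rw [e2, e2'])
          rw [getD_append_lt _ _ _ _ hi, hpi1, getD_append_len] at h1
          have := (hf c1 (p2.getD i ' ')).mpr ⟨i, hi, h1 ▸ hpi1, rfl⟩
          rw [hfc] at this
          simp at this
        | none =>
          simp only [Option.isSome_none, Bool.false_eq_true, if_false]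
          have hbstd : ∀ c d, b.get? c = some d ↔
              ∃ i, i < p2.length ∧ p2.getD i ' ' = c ∧ p1.getD i ' ' = d := by
            intro c d
            rw [hb d c]
            constructor
            · rintro ⟨k, hk, h1, h2⟩; exact ⟨k, hplen ▸ hk, h2, h1⟩
            · rintro ⟨k, hk, h1, h2⟩; exact ⟨k, hplen ▸ hk, h2, h1⟩
          have hfext := mapInv_insert p1 p2 c1 c2 f hplen hf hfc
          have hbext := mapInv_insert p2 p1 c2 c1 b hplen.symm hbstd hbc
          have hres := ih t2 (p1 ++ [c1]) (p2 ++ [c2]) (f.insert c1 c2) (b.insert c2 c1)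
            hlen2 (by simp [hplen]) hfext
            (by
              intro c d
              rw [hbext d c]
              constructor
              · rintro ⟨k, hk, h1, h2⟩
                refine ⟨k, ?_, h2, h1⟩
                simp only [List.length_append, List.length_cons, List.length_nil] at hk ⊢
                omega
              · rintro ⟨k, hk, h1, h2⟩
                refine ⟨k, ?_, h2, h1⟩
                simp only [List.length_append, List.length_cons, List.length_nil] at hk ⊢
                omega)
          rw [hres]
          simp [List.append_assoc]

-- main ------------------------------------------------------------------------

theorem matchingChar_eq (str1 str2 : String) : matchingChar str1 str2 = matchingChar_alt str1 str2 := by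
  set l1 := str1.toList
  set l2 := str2.toList
  by_cases hlen : l1.length = l2.length
  · have hA : matchingChar str1 str2 = true ↔ Riff l1 l2 := by
      rw [matchingChar, beq_iff_eq, findPatternA_eq, findPatternA_eq]
      exact patRef_eq_iff_riff l1 l2 hlen
    have hB : matchingChar_alt str1 str2 = true ↔ Riff l1 l2 := by
      rw [matchingChar_alt, if_neg (by simp only [bne_iff_ne, ne_eq, not_not]; simpa using hlen)]
      have := isoGo_iff l1 l2 [] [] PySem.Dict.empty PySem.Dict.empty hlen rfl
        (by intro c d; simp [PySem.Dict.get?_empty])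
        (by intro c d; simp [PySem.Dict.get?_empty])
      simpa using this
    rw [Bool.eq_iff_iff, hA, hB]
  · have hA : matchingChar str1 str2 = false := by
      rw [matchingChar]
      simp only [beq_eq_false_iff_ne, ne_eq]
      intro h
      have := congrArg List.length h
      rw [findPatternA_eq, findPatternA_eq, patRef_length, patRef_length] at this
      exact hlen this
    have hB : matchingChar_alt str1 str2 = false := by
      rw [matchingChar_alt, if_pos (by simp only [bne_iff_ne, ne_eq]; simpa using hlen)]
    rw [hA, hB]

-- ===== VERDICT (by name: the statement is the Claim_ definition above) =====
theorem matchingChar_spec : Claim_equal_matchingChar := by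
  intro str1 str2 _
  unfold Spec_matchingChar
  exact matchingChar_eq str1 str2
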